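-- pv_equiv track=rewrite | github.com/qalle2/qromp | qromp_enc_ips.py | get_optimized_blocks
-- ===== SOURCE A (Python) =====
-- MAX_BLK_LEN = 0xffff  # maximum length of any block
--
-- def get_blocks(data1, data2):
--     # generate (start, length) of blocks that differ
--
--     start = -1  # start position of current block (-1 = none)
--
--     for (pos, (byte1, byte2)) in enumerate(zip(data1, data2)):
--         if start == -1 and byte1 != byte2:
--             # start a block
--             start = pos
--         elif start != -1 and byte1 == byte2:
--             # end a block
--             yield (start, pos - start)
--             start = -1
--         elif start != -1 and pos - start == MAX_BLK_LEN:
--             # end a block and start a new one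
--             yield (start, pos - start)
--             start = pos
--
--     if start != -1:
--         # end the last block shared by both files
--         yield (start, len(data1) - start)
--
--     # data after end of first file, if any
--     for start in range(len(data1), len(data2), MAX_BLK_LEN):
--         yield (start, min(len(data2) - start, MAX_BLK_LEN))
--
-- def get_optimized_blocks(data1, data2, maxGap):
--     # generate (start, length) of blocks that differ, with some blocks merged;
--     # maxGap: maximum number of unchanged bytes between two merged blocks
--
--     blockBuf = []  # blocks not generated yet
--     for (start, length) in get_blocks(data1, data2):
--         blockBuf.append((start, length))
--         # if gap between last two blocks is too large
--         # or the whole buffer is too large...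
--         if len(blockBuf) >= 2 and (
--             blockBuf[-1][0] - sum(blockBuf[-2]) > maxGap
--             or sum(blockBuf[-1]) - blockBuf[0][0] > MAX_BLK_LEN
--         ):
--             # ...output all but the last block as one and delete from buffer
--             yield (blockBuf[0][0], sum(blockBuf[-2]) - blockBuf[0][0])
--             blockBuf = blockBuf[-1:]
--
--     if blockBuf:
--         # output remaining blocks
--         yield (blockBuf[0][0], sum(blockBuf[-1]) - blockBuf[0][0])
-- ===== SOURCE B (Python) =====
-- MAX_BLK_LEN = 0xffff  # maximum length of any block
--
-- def _chunks(s, e, last):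
--     # split [s, e) into greedy pieces of at most MAX_BLK_LEN;
--     # the final piece extends to `last`
--     out = []
--     while e - s > MAX_BLK_LEN:
--         out.append((s, MAX_BLK_LEN))
--         s += MAX_BLK_LEN
--     out.append((s, last - s))
--     return out
--
-- def _runs(mism):
--     # group the sorted mismatch indices into maximal consecutive (start, end) runs
--     runs = []
--     i = 0
--     while i < len(mism):
--         s = mism[i]
--         e = s + 1
--         i += 1
--         while i < len(mism) and mism[i] == e:
--             e += 1
--             i += 1
--         runs.append((s, e))
--     return runs
--
-- def get_optimized_blocks(data1, data2, maxGap):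
--     # staged pipeline: mismatch indices -> consecutive runs -> chunked raw
--     # blocks -> merged groups extracted one output block at a time
--     n = min(len(data1), len(data2))
--     mism = [i for (i, (x, y)) in enumerate(zip(data1, data2)) if x != y]
--     raw = []
--     for (s, e) in _runs(mism):
--         raw += _chunks(s, e, len(data1) if e == n else e)
--     for s in range(len(data1), len(data2), MAX_BLK_LEN):
--         raw.append((s, min(len(data2) - s, MAX_BLK_LEN)))
--     # extract one merged group per output block
--     i = 0
--     while i < len(raw):
--         (ms, l) = raw[i]
--         pe = ms + l
--         i += 1
--         while i < len(raw) and raw[i][0] - pe <= maxGap and raw[i][0] + raw[i][1] - ms <= MAX_BLK_LEN: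
--             pe = raw[i][0] + raw[i][1]
--             i += 1
--         yield (ms, pe - ms)
-- ===== Notes on version B (the rewrite author's own statement) =====
-- stated objective: alternative
-- what changed: A's two streaming state machines (a per-byte sentinel scan yielding blocks into a generator, then a loop with a list buffer flushed via [-1]/[-2]/[0] indexing and repeated sums) are replaced by a staged pipeline: a comprehension collecting mismatch indices, grouping of consecutive indices into runs, chunk expansion of each run, and a nested loop that extracts one merged group per output block.
import Mathlib
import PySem

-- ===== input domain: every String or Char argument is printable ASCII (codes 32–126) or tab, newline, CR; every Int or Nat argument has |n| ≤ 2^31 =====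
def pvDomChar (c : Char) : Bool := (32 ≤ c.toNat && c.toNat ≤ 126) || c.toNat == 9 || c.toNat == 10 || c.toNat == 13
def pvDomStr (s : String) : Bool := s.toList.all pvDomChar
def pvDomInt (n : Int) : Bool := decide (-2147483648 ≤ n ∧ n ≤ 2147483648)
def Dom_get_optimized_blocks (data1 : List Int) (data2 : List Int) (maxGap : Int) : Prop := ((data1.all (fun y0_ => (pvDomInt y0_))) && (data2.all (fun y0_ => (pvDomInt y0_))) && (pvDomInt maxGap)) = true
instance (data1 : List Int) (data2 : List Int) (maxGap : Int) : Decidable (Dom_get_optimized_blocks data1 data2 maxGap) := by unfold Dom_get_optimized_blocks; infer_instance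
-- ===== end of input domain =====

-- B replaces A's two streaming state machines by a staged pipeline (mismatch
-- indices, consecutive runs, chunking, group extraction); objective: alternative.

-- ===== PORT A =====

-- the for-loop of get_blocks: state = start (-1 = none); returns (emitted blocks, final start)
def gbLoop (l : List (Int × Int)) (pos : Nat) (start : Int) : List (Int × Int) × Int :=
  match l with
  | [] => ([], start)
  | (b1, b2) :: rest =>
    if start = -1 ∧ b1 ≠ b2 then
      gbLoop rest (pos + 1) (pos : Int)
    else if start ≠ -1 ∧ b1 = b2 then
      let r := gbLoop rest (pos + 1) (-1)
      ((start, (pos : Int) - start) :: r.1, r.2)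
    else if start ≠ -1 ∧ (pos : Int) - start = 65535 then
      let r := gbLoop rest (pos + 1) (pos : Int)
      ((start, (pos : Int) - start) :: r.1, r.2)
    else
      gbLoop rest (pos + 1) start

def getBlocks (data1 data2 : List Int) : List (Int × Int) :=
  ((gbLoop (data1.zip data2) 0 (-1)).1 ++
      (if (gbLoop (data1.zip data2) 0 (-1)).2 ≠ -1 then
        [((gbLoop (data1.zip data2) 0 (-1)).2,
          (data1.length : Int) - (gbLoop (data1.zip data2) 0 (-1)).2)]
      else []))
    ++ (PySem.List.pyRange (data1.length : Int) (data2.length : Int) 65535).map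
         (fun s => (s, min ((data2.length : Int) - s) 65535))

def pvSumP (p : Int × Int) : Int := p.1 + p.2

-- the merge loop of get_optimized_blocks, with its explicit block buffer
def mergeLoop (maxGap : Int) (bs : List (Int × Int)) (buf : List (Int × Int)) : List (Int × Int) :=
  match bs with
  | [] =>
    if buf ≠ [] then [((buf.headD (0, 0)).1, pvSumP (buf.getLastD (0, 0)) - (buf.headD (0, 0)).1)]
    else []
  | blk :: rest =>
    let buf' := buf ++ [blk]
    if 2 ≤ buf'.length ∧
        ((buf'.getLastD (0, 0)).1 - pvSumP (buf'.dropLast.getLastD (0, 0)) > maxGap ∨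
          pvSumP (buf'.getLastD (0, 0)) - (buf'.headD (0, 0)).1 > 65535) then
      ((buf'.headD (0, 0)).1, pvSumP (buf'.dropLast.getLastD (0, 0)) - (buf'.headD (0, 0)).1)
        :: mergeLoop maxGap rest [blk]
    else
      mergeLoop maxGap rest buf'

def get_optimized_blocks (data1 : List Int) (data2 : List Int) (maxGap : Int) : List (Int × Int) :=
  mergeLoop maxGap (getBlocks data1 data2) []

-- ===== PORT B =====

-- _chunks: greedy ≤ 65535 pieces of [s, e); the final piece extends to `last`
def chunksB (s e last : Int) : List (Int × Int) :=
  if e - s > 65535 then (s, 65535) :: chunksB (s + 65535) e last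
  else [(s, last - s)]
termination_by (e - s).toNat
decreasing_by omega

-- the inner while of _runs: extend end `e` while the next index is consecutive;
-- returns (final end, remaining indices)
def splitRun (e : Int) (l : List Int) : Int × List Int :=
  match l with
  | [] => (e, [])
  | j :: rest => if j = e then splitRun (e + 1) rest else (e, j :: rest)

theorem splitRun_snd_length_le (e : Int) (l : List Int) :
    (splitRun e l).2.length ≤ l.length := by
  induction l generalizing e with
  | nil => simp [splitRun]
  | cons j rest ih =>
    by_cases h : j = e <;> simp [splitRun, h]
    exact Nat.le_succ_of_le (ih (e + 1))

-- the outer while of _runs: one maximal consecutive run per iteration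
def runsB (l : List Int) : List (Int × Int) :=
  match l with
  | [] => []
  | i :: rest =>
    let r := splitRun (i + 1) rest
    (i, r.1) :: runsB r.2
termination_by l.length
decreasing_by have := splitRun_snd_length_le (i + 1) rest; simp; omega

-- the inner while of the merge-extraction loop: extend the group; returns
-- (end of previous block, remaining raw blocks)
def consumeB (g ms : Int) (pe : Int) (l : List (Int × Int)) : Int × List (Int × Int) :=
  match l with
  | [] => (pe, [])
  | (s, len) :: rest =>
    if s - pe ≤ g ∧ s + len - ms ≤ 65535 then consumeB g ms (s + len) rest
    else (pe, (s, len) :: rest)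

theorem consumeB_snd_length_le (g ms : Int) (pe : Int) (l : List (Int × Int)) :
    (consumeB g ms pe l).2.length ≤ l.length := by
  induction l generalizing pe with
  | nil => simp [consumeB]
  | cons x rest ih =>
    obtain ⟨s, len⟩ := x
    rw [consumeB]
    split_ifs with h
    · exact Nat.le_trans (ih (s + len)) (by simp)
    · simp

-- the outer while: one merged group per output block
def mergeScanB (g : Int) (l : List (Int × Int)) : List (Int × Int) :=
  match l with
  | [] => []
  | (ms, len) :: rest =>
    let r := consumeB g ms (ms + len) rest
    (ms, r.1 - ms) :: mergeScanB g r.2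
termination_by l.length
decreasing_by have := consumeB_snd_length_le g ms (ms + len) rest; simp; omega

def get_optimized_blocks_alt (data1 : List Int) (data2 : List Int) (maxGap : Int) : List (Int × Int) :=
  let n : Int := min (data1.length : Int) (data2.length : Int)
  -- [i for (i, (x, y)) in enumerate(zip(data1, data2)) if x != y]
  let mism := (PySem.List.enumerate (data1.zip data2) 0).filterMap
      (fun p => if p.2.1 ≠ p.2.2 then some p.1 else none)
  let raw := (runsB mism).flatMap
      (fun r => chunksB r.1 r.2 (if r.2 = n then (data1.length : Int) else r.2))
    ++ (PySem.List.pyRange (data1.length : Int) (data2.length : Int) 65535).map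
         (fun s => (s, min ((data2.length : Int) - s) 65535))
  mergeScanB maxGap raw

-- ===== PRECONDITION & SPEC =====
def Spec_get_optimized_blocks (data1 : List Int) (data2 : List Int) (maxGap : Int) (out : List (Int × Int)) : Prop := out = get_optimized_blocks_alt data1 data2 maxGap
instance (data1 : List Int) (data2 : List Int) (maxGap : Int) (out : List (Int × Int)) : Decidable (Spec_get_optimized_blocks data1 data2 maxGap out) := by unfold Spec_get_optimized_blocks; infer_instance

-- ===== CLAIM (what is proved, stated in full; the proofs are below) =====
def Claim_equal_get_optimized_blocks : Prop := ∀ (data1 : List Int) (data2 : List Int) (maxGap : Int), Dom_get_optimized_blocks data1 data2 maxGap → Spec_get_optimized_blocks data1 data2 maxGap (get_optimized_blocks data1 data2 maxGap)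

-- ===== LEMMAS AND PROOFS =====

-- mismatch indices of the zipped list, starting at position p
def misFrom (l : List (Int × Int)) (p : Int) : List Int :=
  match l with
  | [] => []
  | (a, b) :: rest => if a ≠ b then p :: misFrom rest (p + 1) else misFrom rest (p + 1)

theorem misFrom_enumerate (l : List (Int × Int)) (p : Int) :
    (PySem.List.enumerate l p).filterMap (fun q => if q.2.1 ≠ q.2.2 then some q.1 else none)
      = misFrom l p := by
  induction l generalizing p with
  | nil => simp [PySem.List.enumerate_nil, misFrom]
  | cons x rest ih =>
    obtain ⟨a, b⟩ := x
    simp only [PySem.List.enumerate_cons, List.filterMap_cons, ih]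
    by_cases h : a = b <;> simp [misFrom, h]

theorem misFrom_ge (l : List (Int × Int)) (p : Int) : ∀ x ∈ misFrom l p, p ≤ x := by
  induction l generalizing p with
  | nil => simp [misFrom]
  | cons x rest ih =>
    obtain ⟨a, b⟩ := x
    intro y hy
    by_cases h : a = b <;> simp [misFrom, h] at hy
    · have := ih (p + 1) y hy; omega
    · rcases hy with rfl | hy
      · omega
      · have := ih (p + 1) y hy; omega

-- first index ≥ pos where bytes agree (or end of list), and the rest of the list
def takeRun (l : List (Int × Int)) (pos : Nat) : Nat × List (Int × Int) :=
  match l with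
  | [] => (pos, [])
  | (a, b) :: rest => if a ≠ b then takeRun rest (pos + 1) else (pos, (a, b) :: rest)

theorem takeRun_fst_ge (l : List (Int × Int)) (pos : Nat) : pos ≤ (takeRun l pos).1 := by
  induction l generalizing pos with
  | nil => simp [takeRun]
  | cons x rest ih =>
    obtain ⟨a, b⟩ := x
    by_cases h : a ≠ b <;> simp [takeRun, h]
    exact Nat.le_of_succ_le (ih (pos + 1))

theorem takeRun_sum (l : List (Int × Int)) (pos : Nat) :
    (takeRun l pos).1 + (takeRun l pos).2.length = pos + l.length := by
  induction l generalizing pos with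
  | nil => simp [takeRun]
  | cons x rest ih =>
    obtain ⟨a, b⟩ := x
    rw [takeRun]
    split_ifs with h
    · have := ih (pos + 1); simp only [List.length_cons] at *; omega
    · simp

theorem chunksB_small (s e last : Int) (h : e - s ≤ 65535) :
    chunksB s e last = [(s, last - s)] := by
  rw [chunksB]; simp [Int.not_lt.mpr h]

theorem splitRun_takeRun (l : List (Int × Int)) (p : Nat) :
    splitRun (p : Int) (misFrom l (p : Int))
      = (((takeRun l p).1 : Int), misFrom (takeRun l p).2 ((takeRun l p).1 : Int)) := by
  induction l generalizing p with
  | nil => simp [misFrom, splitRun, takeRun]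
  | cons x rest ih =>
    obtain ⟨a, b⟩ := x
    by_cases h : a = b
    · -- run ends here: the next mismatch index (if any) is > p
      simp only [misFrom, takeRun, h, ne_eq, not_true_eq_false, if_false, ite_not, if_pos rfl,
        if_true]
      cases hm : misFrom rest ((p : Int) + 1) with
      | nil => simp [splitRun, misFrom, h, hm]
      | cons j m' =>
        have hj : (p : Int) + 1 ≤ j := misFrom_ge rest ((p : Int) + 1) j (by rw [hm]; simp)
        have : j ≠ (p : Int) := by omega
        simp [splitRun, misFrom, h, hm, this]
    · -- run continues
      have h1 := ih (p + 1)
      push_cast at h1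
      simp [misFrom, takeRun, splitRun, h, h1]

-- A's emitted blocks plus its final open-block emission
def pvAfin (len1 : Nat) (r : List (Int × Int) × Int) : List (Int × Int) :=
  r.1 ++ (if r.2 ≠ -1 then [(r.2, (len1 : Int) - r.2)] else [])

-- B's raw blocks from a run list
def expandB (n len1 : Int) (rs : List (Int × Int)) : List (Int × Int) :=
  rs.flatMap (fun r => chunksB r.1 r.2 (if r.2 = n then len1 else r.2))

theorem expandB_cons (n len1 s e : Int) (rs : List (Int × Int)) :
    expandB n len1 ((s, e) :: rs)
      = chunksB s e (if e = n then len1 else e) ++ expandB n len1 rs := by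
  simp [expandB]

theorem gb_scan (l : List (Int × Int)) (len1 n : Nat) :
    (∀ pos : Nat, pos + l.length = n →
      pvAfin len1 (gbLoop l pos (-1)) = expandB (n : Int) (len1 : Int) (runsB (misFrom l (pos : Int)))) ∧
    (∀ pos s : Nat, s ≤ pos → pos - s ≤ 65535 → pos + l.length = n →
      pvAfin len1 (gbLoop l pos (s : Int)) =
        chunksB (s : Int) ((takeRun l pos).1 : Int)
            (if (takeRun l pos).2 = [] then (len1 : Int) else ((takeRun l pos).1 : Int))
          ++ expandB (n : Int) (len1 : Int)
              (runsB (misFrom (takeRun l pos).2 ((takeRun l pos).1 : Int)))) := by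
  induction l with
  | nil =>
    constructor
    · intro pos _; simp [gbLoop, misFrom, runsB, expandB, pvAfin]
    · intro pos s h1 h2 _
      have hs : ((s : Nat) : Int) ≠ -1 := by omega
      have hsm : ((pos : Nat) : Int) - ((s : Nat) : Int) ≤ 65535 := by omega
      simp [gbLoop, takeRun, misFrom, runsB, expandB, pvAfin, hs,
        chunksB_small (s : Int) (pos : Int) (len1 : Int) hsm]
  | cons x rest ih =>
    obtain ⟨a, b⟩ := x
    constructor
    · intro pos hn
      by_cases hab : a = b
      · have h := ih.1 (pos + 1) (by simp at hn ⊢; omega)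
        push_cast at h
        simp [gbLoop, misFrom, hab, h]
      · -- a block starts at pos
        have h := ih.2 (pos + 1) pos (by omega) (by omega) (by simp at hn ⊢; omega)
        have hsr := splitRun_takeRun rest (pos + 1)
        push_cast at hsr
        have hts := takeRun_sum rest (pos + 1)
        have hiff : (((takeRun rest (pos + 1)).1 : Nat) : Int) = (n : Int)
            ↔ (takeRun rest (pos + 1)).2 = [] := by
          constructor
          · intro he
            have : (takeRun rest (pos + 1)).1 = n := by exact_mod_cast he
            have : (takeRun rest (pos + 1)).2.length = 0 := by simp at hn; omega
            exact List.eq_nil_of_length_eq_zero this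
          · intro he
            rw [he] at hts; simp at hts hn
            have hh : (takeRun rest (pos + 1)).1 = n := by omega
            exact_mod_cast hh
        have hgb : gbLoop ((a, b) :: rest) pos (-1) = gbLoop rest (pos + 1) (pos : Int) := by
          simp [gbLoop, hab]
        have hmf : misFrom ((a, b) :: rest) (pos : Int)
            = (pos : Int) :: misFrom rest ((pos : Int) + 1) := by
          simp [misFrom, hab]
        have hruns : runsB ((pos : Int) :: misFrom rest ((pos : Int) + 1))
            = ((pos : Int), ((takeRun rest (pos + 1)).1 : Int))
              :: runsB (misFrom (takeRun rest (pos + 1)).2 ((takeRun rest (pos + 1)).1 : Int)) := by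
          rw [runsB, hsr]
        have hif : (if (takeRun rest (pos + 1)).2 = [] then ((len1 : Nat) : Int)
              else ((takeRun rest (pos + 1)).1 : Int))
            = (if ((takeRun rest (pos + 1)).1 : Int) = ((n : Nat) : Int) then ((len1 : Nat) : Int)
              else ((takeRun rest (pos + 1)).1 : Int)) := by
          by_cases he : (takeRun rest (pos + 1)).2 = []
          · rw [if_pos he, if_pos (hiff.mpr he)]
          · rw [if_neg he, if_neg (fun hc => he (hiff.mp hc))]
        rw [hgb, h, hmf, hruns, expandB_cons, hif]
    · intro pos s h1 h2 hn
      have hs : ((s : Nat) : Int) ≠ -1 := by omega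
      by_cases hab : a = b
      · -- run ends here: A closes the block; B's chunk has length pos - s
        have h := ih.1 (pos + 1) (by simp at hn ⊢; omega)
        have hsm : ((pos : Nat) : Int) - ((s : Nat) : Int) ≤ 65535 := by omega
        push_cast at h
        simp only [takeRun, misFrom, hab, ne_eq, not_true_eq_false, if_false, ite_not, if_pos rfl,
          if_true] at *
        simp [gbLoop, pvAfin, hab, hs, chunksB_small (s : Int) (pos : Int) (pos : Int) hsm] at h ⊢
        simp [h]
      · by_cases hmax : ((pos : Nat) : Int) - ((s : Nat) : Int) = 65535
        · -- chunk reached max length: A splits at pos, B's chunksB emits a 65535 piece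
          have h := ih.2 (pos + 1) pos (by omega) (by omega) (by simp at hn ⊢; omega)
          have hge : pos + 1 ≤ (takeRun rest (pos + 1)).1 := takeRun_fst_ge rest (pos + 1)
          have htr : takeRun ((a, b) :: rest) pos = takeRun rest (pos + 1) := by
            simp [takeRun, hab]
          rw [htr, chunksB, if_pos (by push_cast; omega : ((takeRun rest (pos + 1)).1 : Int) - (s : Int) > 65535),
            show (s : Int) + 65535 = (pos : Int) from by omega]
          have hmf : misFrom ((a, b) :: rest) (pos : Int) = (pos : Int) :: misFrom rest ((pos : Int) + 1) := by
            simp [misFrom, hab]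
          simp only [pvAfin, ne_eq, ite_not] at h ⊢
          simp only [gbLoop, hab, hs, hmax, ne_eq, not_false_eq_true, and_true, true_and,
            not_true_eq_false, false_and, if_false, if_true, ite_false, ite_true,
            List.cons_append] at h ⊢
          simp [h]
        · -- run continues: A keeps the open block
          have h := ih.2 (pos + 1) s (by omega) (by omega) (by simp at hn ⊢; omega)
          simp [gbLoop, takeRun, hab, hs, hmax, h]

-- A's merge state machine rephrased with scalar state (merge start, prev end)
def mergeAlt (maxGap : Int) (bs : List (Int × Int)) (st : Option (Int × Int)) : List (Int × Int) :=
  match bs, st with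
  | [], none => []
  | [], some (ms, pe) => [(ms, pe - ms)]
  | (s, len) :: rest, none => mergeAlt maxGap rest (some (s, s + len))
  | (s, len) :: rest, some (ms, pe) =>
    if s - pe > maxGap ∨ s + len - ms > 65535 then
      (ms, pe - ms) :: mergeAlt maxGap rest (some (s, s + len))
    else
      mergeAlt maxGap rest (some (ms, s + len))

-- the observable part of A's buffer: (first start, end of last block)
def pvObs (buf : List (Int × Int)) : Option (Int × Int) :=
  match buf with
  | [] => none
  | _ => some ((buf.headD (0, 0)).1, pvSumP (buf.getLastD (0, 0)))

theorem merge_eq (g : Int) (bs : List (Int × Int)) :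
    ∀ buf, mergeLoop g bs buf = mergeAlt g bs (pvObs buf) := by
  induction bs with
  | nil =>
    intro buf
    cases buf with
    | nil => simp [mergeLoop, mergeAlt, pvObs]
    | cons x xs => simp [mergeLoop, mergeAlt, pvObs]
  | cons blk rest ih =>
    intro buf
    obtain ⟨s, len⟩ := blk
    cases buf with
    | nil => simp [mergeLoop, mergeAlt, pvObs, ih, pvSumP]
    | cons x xs =>
      have hlast : ((x :: xs) ++ [(s, len)]).getLastD (0, 0) = (s, len) := by
        rw [List.getLastD_eq_getLast?, List.getLast?_concat]; rfl
      have hobs : pvObs (x :: (xs ++ [(s, len)])) = some (x.1, s + len) := by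
        have h := hlast
        simp only [List.cons_append, List.getLastD_eq_getLast?] at h
        simp [pvObs, pvSumP, h]
      rw [mergeLoop]
      simp only [List.dropLast_concat, hlast]
      rw [show pvObs (x :: xs) = some ((x.1), pvSumP ((x :: xs).getLastD (0, 0))) from rfl,
        mergeAlt]
      simp only [pvSumP, gt_iff_lt, List.cons_append, List.headD_cons]
      have h2len : 2 ≤ (x :: (xs ++ [(s, len)])).length := by simp
      split_ifs with h1 hc hc
      · rw [ih [(s, len)]]; rfl
      · exact absurd h1.2 hc
      · exact absurd ⟨h2len, hc⟩ h1
      · rw [ih (x :: (xs ++ [(s, len)])), hobs]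

theorem mergeAlt_some (g : Int) (bs : List (Int × Int)) :
    ∀ ms pe, mergeAlt g bs (some (ms, pe)) =
      (ms, (consumeB g ms pe bs).1 - ms) :: mergeScanB g (consumeB g ms pe bs).2 := by
  induction bs with
  | nil => intro ms pe; simp [mergeAlt, consumeB, mergeScanB]
  | cons x rest ih =>
    intro ms pe
    obtain ⟨s, len⟩ := x
    by_cases hc : s - pe ≤ g ∧ s + len - ms ≤ 65535
    · have hnot : ¬ (s - pe > g ∨ s + len - ms > 65535) := by omega
      simp [mergeAlt, consumeB, hc, hnot, ih]
    · have hyes : s - pe > g ∨ s + len - ms > 65535 := by omega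
      rw [mergeAlt, if_pos hyes, ih s (s + len)]
      rw [show consumeB g ms pe ((s, len) :: rest) = (pe, (s, len) :: rest) from by
        rw [consumeB, if_neg hc]]
      rw [mergeScanB]

theorem mergeAlt_none (g : Int) (bs : List (Int × Int)) :
    mergeAlt g bs none = mergeScanB g bs := by
  cases bs with
  | nil => simp [mergeAlt, mergeScanB]
  | cons x rest =>
    obtain ⟨ms, len⟩ := x
    rw [mergeAlt, mergeAlt_some, mergeScanB]

theorem getBlocks_eq (d1 d2 : List Int) :
    getBlocks d1 d2 =
      (runsB ((PySem.List.enumerate (d1.zip d2) 0).filterMap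
          (fun p => if p.2.1 ≠ p.2.2 then some p.1 else none))).flatMap
        (fun r => chunksB r.1 r.2
          (if r.2 = min (d1.length : Int) (d2.length : Int) then (d1.length : Int) else r.2))
      ++ (PySem.List.pyRange (d1.length : Int) (d2.length : Int) 65535).map
           (fun s => (s, min ((d2.length : Int) - s) 65535)) := by
  have h := (gb_scan (d1.zip d2) d1.length (d1.zip d2).length).1 0 (by simp)
  rw [Nat.cast_zero] at h
  have hmin : (((d1.zip d2).length : Nat) : Int) = min (d1.length : Int) (d2.length : Int) := by
    rw [List.length_zip]; push_cast; rfl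
  rw [hmin] at h
  unfold getBlocks
  have e : (gbLoop (d1.zip d2) 0 (-1)).1 ++
        (if (gbLoop (d1.zip d2) 0 (-1)).2 ≠ -1 then
          [((gbLoop (d1.zip d2) 0 (-1)).2, (d1.length : Int) - (gbLoop (d1.zip d2) 0 (-1)).2)]
        else []) = pvAfin d1.length (gbLoop (d1.zip d2) 0 (-1)) := rfl
  rw [e, h, misFrom_enumerate]
  rfl

-- ===== VERDICT (by name: the statement is the Claim_ definition above) =====
theorem get_optimized_blocks_spec : Claim_equal_get_optimized_blocks := by
  intro d1 d2 g _
  unfold Spec_get_optimized_blocks get_optimized_blocks get_optimized_blocks_alt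
  rw [merge_eq g (getBlocks d1 d2) [], show pvObs ([] : List (Int × Int)) = none from rfl,
    mergeAlt_none, getBlocks_eq]
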